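-- pv_equiv track=rewrite | github.com/startingfindmistake/test-coding | [백준] 10256, 돌연변이.py | count_mutations
-- ===== SOURCE A (Python) =====
-- def generate_mutations(marker):
--     mutations = set()  # 중복된 돌연변이를 방지하기 위해 세트(set)를 사용합니다.
--     n = len(marker)
--
--     # 두 번째 부분을 뒤집는 모든 경우의 수를 생성
--     for i in range(n + 1):
--         for j in range(n + 1):
--             # 마커의 일부를 뒤집어 돌연변이를 생성합니다.
--             mutated_marker = marker[:i] + marker[i:j][::-1] + marker[j:]
--             mutations.add(mutated_marker)  # 생성된 돌연변이를 세트에 추가합니다.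
--
--     return mutations
--
-- def count_mutations(dna, marker):
--     mutations = generate_mutations(marker)  # 모든 돌연변이를 생성합니다.
--     count = 0  # 출현 횟수를 저장할 변수를 초기화합니다.
--
--     for i in range(len(dna) - len(marker) + 1):
--         substring = dna[i:i + len(marker)]  # DNA 문자열에서 마커와 같은 길이의 부분 문자열을 추출합니다.
--         if substring in mutations:  # 추출한 부분 문자열이 돌연변이 중에 있다면,
--             count += 1  # 출현 횟수를 증가시킵니다.
--
--     return count
-- ===== SOURCE B (Python) =====
-- def count_mutations(dna, marker):
--     m = len(marker)
--     # index the dna windows once: window string -> number of occurrences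
--     counts = {}
--     for i in range(len(dna) - m + 1):
--         w = dna[i:i + m]
--         counts[w] = counts.get(w, 0) + 1
--     # walk the distinct mutations (i <= j suffices: j < i never yields a
--     # length-m string) and sum the indexed occurrence counts
--     total = 0
--     seen = set()
--     for i in range(m + 1):
--         for j in range(i, m + 1):
--             mut = marker[:i] + marker[i:j][::-1] + marker[j:]
--             if mut not in seen:
--                 seen.add(mut)
--                 total += counts.get(mut, 0)
--     return total
-- ===== Notes on version B (the rewrite author's own statement) =====
-- stated objective: alternative
-- what changed: B inverts the counting: instead of generating the full mutation set and testing every dna window for membership, it builds a window->occurrence-count dictionary over dna in one pass and then sums the counts over the distinct mutations, generating only the triangular i<=j cases (j<i never yields a length-m string).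
import Mathlib
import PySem

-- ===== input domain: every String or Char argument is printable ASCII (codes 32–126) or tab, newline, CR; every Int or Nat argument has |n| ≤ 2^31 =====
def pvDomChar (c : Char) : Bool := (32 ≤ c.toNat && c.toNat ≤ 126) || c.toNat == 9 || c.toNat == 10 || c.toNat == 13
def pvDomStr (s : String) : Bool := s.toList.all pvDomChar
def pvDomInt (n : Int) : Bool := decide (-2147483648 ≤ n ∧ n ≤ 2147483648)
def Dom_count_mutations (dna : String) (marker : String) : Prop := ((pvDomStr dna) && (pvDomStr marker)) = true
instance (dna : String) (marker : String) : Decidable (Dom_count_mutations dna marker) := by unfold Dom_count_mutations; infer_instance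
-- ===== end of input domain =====

-- B replaces A's membership scan of dna windows with an inverted index: a window->count dictionary built
-- in one pass over dna, then a sum of counts over the distinct (triangular i<=j) mutations; alternative, same cost.


-- ===== PORT A =====
-- helper: port of generate_mutations (set of all substring-reversal variants of marker)
def genMutations (marker : List Char) : PySem.Set (List Char) :=
  let n : Int := marker.length
  (PySem.List.pyRange 0 (n + 1) 1).foldl (fun muts i =>
    (PySem.List.pyRange 0 (n + 1) 1).foldl (fun muts j =>
      PySem.Set.add muts
        (PySem.List.slice marker none (some i) ++
         (PySem.List.slice marker (some i) (some j)).reverse ++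
         PySem.List.slice marker (some j) none)) muts)
    PySem.Set.empty

def count_mutations (dna : String) (marker : String) : Int :=
  let d := dna.toList
  let t := marker.toList
  let mutations := genMutations t
  (PySem.List.pyRange 0 ((d.length : Int) - t.length + 1) 1).foldl (fun count i =>
    let substring := PySem.List.slice d (some i) (some (i + (t.length : Int)))
    if PySem.Set.contains mutations substring then count + 1 else count) 0

-- ===== PORT B =====
def count_mutations_alt (dna : String) (marker : String) : Int :=
  let d := dna.toList
  let t := marker.toList
  let m : Int := t.length
  let counts := (PySem.List.pyRange 0 ((d.length : Int) - m + 1) 1).foldl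
    (fun cd i =>
      let w := PySem.List.slice d (some i) (some (i + m))
      cd.insert w (cd.getD w 0 + 1))
    (PySem.Dict.empty : PySem.Dict (List Char) Int)
  let res := (PySem.List.pyRange 0 (m + 1) 1).foldl (fun st i =>
    (PySem.List.pyRange i (m + 1) 1).foldl (fun st j =>
      let mu := PySem.List.slice t none (some i) ++
                 (PySem.List.slice t (some i) (some j)).reverse ++
                 PySem.List.slice t (some j) none
      if PySem.Set.contains st.2 mu then st
      else (st.1 + counts.getD mu 0, PySem.Set.add st.2 mu)) st)
    ((0 : Int), (PySem.Set.empty : PySem.Set (List Char)))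
  res.1

-- ===== PRECONDITION & SPEC =====
def Spec_count_mutations (dna : String) (marker : String) (out : Int) : Prop := out = count_mutations_alt dna marker
instance (dna : String) (marker : String) (out : Int) : Decidable (Spec_count_mutations dna marker out) := by unfold Spec_count_mutations; infer_instance

-- ===== CLAIM (what is proved, stated in full; the proofs are below) =====
def Claim_equal_count_mutations : Prop := ∀ (dna : String) (marker : String), Dom_count_mutations dna marker → Spec_count_mutations dna marker (count_mutations dna marker)

-- ===== LEMMAS AND PROOFS =====

-- the list of length-m windows of d, in scan order
def winsOf (d : List Char) (m : Nat) : List (List Char) :=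
  (PySem.List.pyRange 0 ((d.length : Int) - (m : Int) + 1) 1).map
    (fun i => PySem.List.slice d (some i) (some (i + (m : Int))))

-- one mutation string: t with t[i:j] reversed
def mutOf (t : List Char) (i j : Int) : List Char :=
  PySem.List.slice t none (some i) ++ (PySem.List.slice t (some i) (some j)).reverse ++
    PySem.List.slice t (some j) none

-- A's full square generation list and B's triangular one, flattened
def genA (t : List Char) : List (List Char) :=
  (PySem.List.pyRange 0 ((t.length : Int) + 1) 1).flatMap
    (fun i => (PySem.List.pyRange 0 ((t.length : Int) + 1) 1).map (mutOf t i))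

def genB (t : List Char) : List (List Char) :=
  (PySem.List.pyRange 0 ((t.length : Int) + 1) 1).flatMap
    (fun i => (PySem.List.pyRange i ((t.length : Int) + 1) 1).map (mutOf t i))

-- a nested fold is a fold over the flattened list
theorem foldl_foldl_flatMap {α β σ : Type} (l : List α) (g : α → List β) (step : σ → β → σ)
    (init : σ) :
    l.foldl (fun st i => (g i).foldl step st) init = (l.flatMap g).foldl step init := by
  induction l generalizing init with
  | nil => rfl
  | cons x xs ih => simp [List.flatMap, List.foldl_append, ih]

theorem genMutations_eq (t : List Char) :
    genMutations t = PySem.Set.ofList (genA t) := by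
  simp only [genMutations, genA, PySem.Set.ofList_eq_foldl, ← foldl_foldl_flatMap,
    List.foldl_map, mutOf, PySem.Set.empty]

theorem countA_eq (dna marker : String) :
    count_mutations dna marker =
      ((winsOf dna.toList marker.toList.length).countP
        (fun w => (PySem.Set.ofList (genA marker.toList)).contains w) : Int) := by
  simp only [count_mutations, genMutations_eq, winsOf]
  rw [← List.foldl_map
    (f := fun i => PySem.List.slice dna.toList (some i) (some (i + (marker.toList.length : Int))))
    (g := fun (count : Int) w =>
      if (PySem.Set.ofList (genA marker.toList)).contains w then count + 1 else count),
    PySem.List.foldl_count_if]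
  simp [Function.comp_def, PySem.Set.mem_ofList]

-- a set is a prefix of any of its updates (Set.add only appends)
theorem prefix_update {β : Type} [BEq β] (s : PySem.Set β) (gen : List β) :
    s <+: PySem.Set.update s gen := by
  induction gen generalizing s with
  | nil => exact List.prefix_refl s
  | cons x gen ih =>
    refine List.IsPrefix.trans ?_ (ih (PySem.Set.add s x))
    unfold PySem.Set.add
    split
    · exact List.prefix_refl s
    · exact List.prefix_append s [x]

-- the dedup-and-accumulate loop sums f over the newly inserted elements
theorem seenFold {β : Type} [BEq β] (f : β → Int) (gen : List β) :
    ∀ (t0 : Int) (s : PySem.Set β),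
      gen.foldl (fun st x => if PySem.Set.contains st.2 x then st
                  else (st.1 + f x, PySem.Set.add st.2 x)) (t0, s)
        = (t0 + (((PySem.Set.update s gen).drop s.length).map f).sum,
           PySem.Set.update s gen) := by
  induction gen with
  | nil => intro t0 s; simp [PySem.Set.update]
  | cons x gen ih =>
    intro t0 s
    simp only [List.foldl_cons]
    by_cases h : PySem.Set.contains s x
    · have hc : List.contains s x = true := h
      have hadd : PySem.Set.add s x = s := by simp [PySem.Set.add, hc]
      have hupd : PySem.Set.update s (x :: gen) = PySem.Set.update s gen := by
        simp [PySem.Set.update, hadd]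
      rw [if_pos h, ih t0 s, hupd]
    · have hc : List.contains s x = false := by
        exact Bool.not_eq_true _ ▸ (by exact h)
      have hadd : PySem.Set.add s x = s ++ [x] := by simp [PySem.Set.add, hc]
      have hupd : PySem.Set.update s (x :: gen) = PySem.Set.update (s ++ [x]) gen := by
        simp [PySem.Set.update, hadd]
      rw [if_neg h, ih (t0 + f x) (PySem.Set.add s x), hadd, hupd]
      obtain ⟨rest, hrest⟩ := prefix_update (s ++ [x]) gen
      rw [← hrest]
      have h1 : ((s ++ [x]) ++ rest).drop s.length = x :: rest := by
        rw [List.append_assoc]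
        exact List.drop_left
      have h2 : ((s ++ [x]) ++ rest).drop (s ++ [x]).length = rest := List.drop_left
      rw [h1, h2]
      simp [add_assoc]

-- the triangular double loop is a fold over the flattened generation list
theorem triangle_fold {σ : Type} (t : List Char) (step : σ → List Char → σ) (init : σ) :
    (PySem.List.pyRange 0 ((t.length : Int) + 1) 1).foldl (fun st i =>
      (PySem.List.pyRange i ((t.length : Int) + 1) 1).foldl (fun st j =>
        step st (PySem.List.slice t none (some i) ++
          (PySem.List.slice t (some i) (some j)).reverse ++
          PySem.List.slice t (some j) none)) st) init
      = (genB t).foldl step init := by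
  unfold genB
  rw [← foldl_foldl_flatMap]
  simp only [List.foldl_map, mutOf]

theorem countB_eq (dna marker : String) :
    count_mutations_alt dna marker =
      ((PySem.Set.ofList (genB marker.toList)).map
        (fun v => ((winsOf dna.toList marker.toList.length).count v : Int))).sum := by
  simp only [count_mutations_alt]
  rw [← List.foldl_map
    (f := fun i => PySem.List.slice dna.toList (some i) (some (i + (marker.toList.length : Int))))
    (g := fun (cd : PySem.Dict (List Char) Int) w => cd.insert w (cd.getD w 0 + 1)),
    triangle_fold (t := marker.toList)
      (step := fun st mu =>
        if PySem.Set.contains st.2 mu then st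
        else (st.1 +
          (List.foldl (fun (cd : PySem.Dict (List Char) Int) w => cd.insert w (cd.getD w 0 + 1))
            PySem.Dict.empty
            (List.map
              (fun i => PySem.List.slice dna.toList (some i)
                (some (i + (marker.toList.length : Int))))
              (PySem.List.pyRange 0
                ((dna.toList.length : Int) - (marker.toList.length : Int) + 1) 1))).getD mu 0,
          PySem.Set.add st.2 mu)),
    seenFold]
  simp only [PySem.Set.update, PySem.Set.empty, ← PySem.Set.ofList_eq_foldl, List.length_nil,
    List.drop_zero, zero_add]
  refine congrArg List.sum (List.map_congr_left ?_)
  intro v _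
  rw [PySem.Dict.getD_foldl_insert_add_one, PySem.Dict.getD_empty]
  simp [winsOf]

-- countP of a disjunction of disjoint predicates splits
theorem countP_or_disjoint {β : Type} (p q : β → Bool) (xs : List β)
    (h : ∀ x, ¬(p x = true ∧ q x = true)) :
    xs.countP (fun x => p x || q x) = xs.countP p + xs.countP q := by
  induction xs with
  | nil => rfl
  | cons x xs ih =>
    by_cases hp : p x = true <;> by_cases hq : q x = true <;>
      simp [hp, hq, ih] <;> first | omega | exact absurd ⟨hp, hq⟩ (h x)

-- double counting: summing occurrence counts over a duplicate-free list
-- equals counting members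
theorem sum_count_eq_countP {β : Type} [BEq β] [LawfulBEq β] (S : List β) (xs : List β)
    (hS : S.Nodup) :
    (S.map (fun v => (xs.count v : Int))).sum = (xs.countP (fun x => decide (x ∈ S)) : Int) := by
  induction S with
  | nil => simp
  | cons v S ih =>
    have hvS : v ∉ S := (List.nodup_cons.mp hS).1
    have hnd : S.Nodup := (List.nodup_cons.mp hS).2
    have hdisj : ∀ x, ¬((x == v) = true ∧ decide (x ∈ S) = true) := by
      intro x hx
      exact hvS ((beq_iff_eq.mp hx.1) ▸ (decide_eq_true_iff.mp hx.2))
    have hsplit := countP_or_disjoint (fun x => x == v) (fun x => decide (x ∈ S)) xs hdisj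
    have hcong : xs.countP (fun x => decide (x ∈ v :: S))
        = xs.countP (fun x => (x == v) || decide (x ∈ S)) := by
      apply List.countP_congr
      intro x _
      simp [List.mem_cons]
    rw [List.map_cons, List.sum_cons, ih hnd, hcong, hsplit, List.count]
    push_cast
    ring

-- every window has exactly the marker's length
theorem length_mem_winsOf (d : List Char) (m : Nat) (w : List Char) (hw : w ∈ winsOf d m) :
    w.length = m := by
  simp only [winsOf, List.mem_map] at hw
  obtain ⟨i, hi, rfl⟩ := hw
  rw [PySem.List.mem_pyRange_one] at hi
  rw [PySem.List.slice_toNat d hi.1 (by omega)]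
  simp only [List.length_take, List.length_drop]
  omega

-- length of a mutation string
theorem length_mutOf (t : List Char) (i j : Int) (hi : 0 ≤ i) (hj : 0 ≤ j)
    (hin : i ≤ (t.length : Int)) (hjn : j ≤ (t.length : Int)) :
    (mutOf t i j).length = i.toNat + (j.toNat - i.toNat) + (t.length - j.toNat) := by
  unfold mutOf
  rw [PySem.List.slice_to t hi, PySem.List.slice_toNat t hi hj, PySem.List.slice_from t hj]
  simp only [List.length_append, List.length_take, List.length_drop, List.length_reverse]
  omega

-- on strings of the marker's length, membership in the square and the
-- triangular generation lists agree
theorem mem_genA_iff_genB (t : List Char) (w : List Char) (hw : w.length = t.length) :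
    w ∈ genA t ↔ w ∈ genB t := by
  simp only [genA, genB, List.mem_flatMap, List.mem_map, PySem.List.mem_pyRange_one]
  constructor
  · rintro ⟨i, ⟨hi0, hi1⟩, j, ⟨hj0, hj1⟩, rfl⟩
    refine ⟨i, ⟨hi0, hi1⟩, j, ⟨?_, hj1⟩, rfl⟩
    by_contra hij
    have hlen := length_mutOf t i j hi0 hj0 (by omega) (by omega)
    omega
  · rintro ⟨i, ⟨hi0, hi1⟩, j, ⟨hij, hj1⟩, rfl⟩
    exact ⟨i, ⟨hi0, hi1⟩, j, ⟨by omega, hj1⟩, rfl⟩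

-- ===== VERDICT (by name: the statement is the Claim_ definition above) =====
theorem count_mutations_spec : Claim_equal_count_mutations := by
  intro dna marker _
  unfold Spec_count_mutations
  rw [countA_eq, countB_eq,
    sum_count_eq_countP _ _ (PySem.Set.nodup_ofList (genB marker.toList))]
  congr 1
  apply List.countP_congr
  intro w hw
  have hlen := length_mem_winsOf _ _ _ hw
  have hAB := mem_genA_iff_genB marker.toList w hlen
  rw [Bool.eq_iff_iff]
  simp [PySem.Set.mem_ofList, hAB]
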